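-- pv_equiv track=rewrite | github.com/KrzysztofSwedziol/ASD- | ASD zadania z egzaminów/Swap Discs/swap discs.py | swaps
-- ===== SOURCE A (Python) =====
-- def explore(graph, node, visited, parents, disk, amounts, prev_disc, swaps):
--     if amounts[node] == 0:
--         visited[node] = True
--         curr_disk = disk[node]
--         if curr_disk != prev_disc:
--             swaps[0] += 1
--         for neighbour in graph[node]:
--             amounts[neighbour] -= 1
--         for neighbour in graph[node]:
--             if visited[neighbour] == False:
--                 parents[neighbour] = node
--                 explore(graph, neighbour, visited, parents, disk, amounts, disk[node], swaps)
--
-- def DFS(graph, disk, amounts, start, starting_disk):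
--     n = len(graph)
--     visited = [False for i in range(n)]
--     parents = [None for i in range(n)]
--     swaps = [0]
--     explore(graph, start, visited, parents, disk, amounts, starting_disk, swaps)
--     return swaps[0]
--
-- def create_graph(graph, depends):
--     n = len(graph)
--     for i in range(n):
--         for j in range(len(depends[i])):
--             curr_depend = depends[i][j]
--             graph[curr_depend].append(i)
--
-- def add_amounts(amounts, depends):
--     n = len(depends)
--     for i in range(n):
--         amounts[i] = len(depends[i])
--
-- def find_start(disk, depends):
--     n = len(disk)
--     for i in range(n):
--         if len(depends[i]) == 0:
--             return i, disk[i]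
--
-- def swaps( disk, depends ):
--     n = len(disk)
--     graph = [[] for i in range(n)]
--     amounts = [0 for i in range(n)]
--     create_graph(graph, depends)
--     add_amounts(amounts, depends)
--
--     start, starting_disk = find_start(disk, depends)
--
--     min_val = DFS(graph, disk, amounts, start, starting_disk)
--
--     return min_val
-- ===== SOURCE B (Python) =====
-- def swaps(disk, depends):
--     n = len(disk)
--     graph = [[] for _ in range(n)]
--     for i, deps in enumerate(depends):
--         for d in deps:
--             graph[d].append(i)
--     amounts = [len(d) for d in depends]
--     start = depends.index([])
--     visited = [False] * n
--     count = 0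
--     stack = [(start, disk[start])]
--     while stack:
--         node, prev = stack.pop()
--         if not visited[node] and amounts[node] == 0:
--             visited[node] = True
--             if disk[node] != prev:
--                 count += 1
--             for nb in graph[node]:
--                 amounts[nb] -= 1
--             for nb in reversed(graph[node]):
--                 stack.append((nb, disk[node]))
--     return count
-- ===== Notes on version B (the rewrite author's own statement) =====
-- stated objective: alternative
-- what changed: The recursive DFS (explore with a mutable swaps cell, parents array and five helpers) is replaced by a single iterative traversal with an explicit stack of (node, prev_disc) pairs, pushing neighbours in reverse so they are processed in A's recursion order; graph and amounts are built with enumerate/comprehension and the start node found with list.index([]).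
import Mathlib
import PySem

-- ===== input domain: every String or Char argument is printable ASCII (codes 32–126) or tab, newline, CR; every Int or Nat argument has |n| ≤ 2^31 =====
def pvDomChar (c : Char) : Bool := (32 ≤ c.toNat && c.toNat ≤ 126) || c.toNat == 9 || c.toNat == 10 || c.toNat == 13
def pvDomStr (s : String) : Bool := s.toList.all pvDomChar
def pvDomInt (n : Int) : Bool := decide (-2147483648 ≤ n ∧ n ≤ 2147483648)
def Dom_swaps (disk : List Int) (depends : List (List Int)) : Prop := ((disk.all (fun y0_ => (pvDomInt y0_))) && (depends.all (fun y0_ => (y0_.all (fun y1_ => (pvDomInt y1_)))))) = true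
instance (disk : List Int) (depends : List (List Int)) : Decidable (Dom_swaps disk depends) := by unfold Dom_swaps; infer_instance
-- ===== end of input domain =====

-- B replaces the recursive DFS of A by an iterative traversal with an explicit stack
-- of (node, prev_disc) pairs (objective: alternative, same asymptotic cost).

-- shared one-line helper: 'graph[d].append(i)' (both Pythons contain this very statement)
def pvAppendAt (g : List (List Int)) (d : Int) (i : Int) : List (List Int) :=
  PySem.List.pySetD g d (PySem.List.pyGetD g d [] ++ [i])

-- ===== PORT A =====

-- create_graph(graph, depends)
def createGraphA (g : List (List Int)) (depends : List (List Int)) : List (List Int) :=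
  (PySem.List.pyRange 0 (g.length : Int) 1).foldl
    (fun g' i =>
      (PySem.List.pyRange 0 ((PySem.List.pyGetD depends i []).length : Int) 1).foldl
        (fun g'' j => pvAppendAt g'' (PySem.List.pyGetD (PySem.List.pyGetD depends i []) j 0) i) g')
    g

-- add_amounts(amounts, depends)
def addAmountsA (amounts : List Int) (depends : List (List Int)) : List Int :=
  (PySem.List.pyRange 0 (depends.length : Int) 1).foldl
    (fun a i => PySem.List.pySetD a i ((PySem.List.pyGetD depends i []).length : Int)) amounts

-- find_start(disk, depends): scan i in range(len(disk))
def findStartGo (disk : List Int) (depends : List (List Int)) : List Int → Option (Int × Int)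
  | [] => none
  | i :: rest =>
    if (PySem.List.pyGetD depends i []).length = 0 then some (i, PySem.List.pyGetD disk i 0)
    else findStartGo disk depends rest

def findStartA (disk : List Int) (depends : List (List Int)) : Option (Int × Int) :=
  findStartGo disk depends (PySem.List.pyRange 0 (disk.length : Int) 1)

-- explore(graph, node, visited, parents, disk, amounts, prev_disc, swaps); state = (visited, parents, amounts, swaps[0])
mutual
def exploreA (graph : List (List Int)) (disk : List Int) :
    Nat → Int → Int → (List Bool × List (Option Int) × List Int × Int) →
    (List Bool × List (Option Int) × List Int × Int)
  | 0, _, _, st => st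
  | f+1, node, prev, (vis, par, amt, cnt) =>
    if PySem.List.pyGetD amt node 1 = 0 then
      let vis1 := PySem.List.pySetD vis node true
      let cnt1 := if PySem.List.pyGetD disk node 0 ≠ prev then cnt + 1 else cnt
      let nbs := PySem.List.pyGetD graph node []
      let amt1 := nbs.foldl (fun a nb => PySem.List.pySetD a nb (PySem.List.pyGetD a nb 0 - 1)) amt
      exploreLoopA graph disk f node nbs (vis1, par, amt1, cnt1)
    else (vis, par, amt, cnt)
termination_by f node prev st => (f, 0)

def exploreLoopA (graph : List (List Int)) (disk : List Int) :
    Nat → Int → List Int → (List Bool × List (Option Int) × List Int × Int) →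
    (List Bool × List (Option Int) × List Int × Int)
  | _, _, [], st => st
  | f, node, nb :: rest, (vis, par, amt, cnt) =>
    let st1 :=
      if PySem.List.pyGetD vis nb true = false then
        exploreA graph disk f nb (PySem.List.pyGetD disk node 0)
          (vis, PySem.List.pySetD par nb (some node), amt, cnt)
      else (vis, par, amt, cnt)
    exploreLoopA graph disk f node rest st1
termination_by f node l st => (f, l.length + 1)
end

def swaps (disk : List Int) (depends : List (List Int)) : Int :=
  let n := disk.length
  let graph := createGraphA (List.replicate n []) depends
  let amounts := addAmountsA (List.replicate n 0) depends
  match findStartA disk depends with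
  | none => 0
  | some (start, startingDisk) =>
    (exploreA graph disk (n + 1) start startingDisk
      (List.replicate n false, List.replicate n none, amounts, 0)).2.2.2

-- ===== PORT B =====

-- graph built from enumerate(depends)
def buildGraphB (depends : List (List Int)) (g : List (List Int)) : List (List Int) :=
  (PySem.List.enumerate depends).foldl
    (fun g' p => p.2.foldl (fun g'' d => pvAppendAt g'' d p.1) g') g

-- lemmas cited by runB's decreasing_by (about the pushed stack and the visited count)
theorem pvPush (l : List Int) (d : Int) (rest : List (Int × Int)) :
    l.reverse.foldl (fun s nb => (nb, d) :: s) rest = l.map (fun nb => (nb, d)) ++ rest := by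
  induction l generalizing rest with
  | nil => rfl
  | cons x t ih =>
    simp only [List.reverse_cons, List.foldl_append, List.foldl_cons, List.foldl_nil,
      List.map_cons, ih]
    rfl

theorem pvCountSetTrue (l : List Bool) (k : Nat) (hk : k < l.length) (hf : l[k] = false) :
    (l.set k true).count false + 1 = l.count false := by
  induction l generalizing k with
  | nil => simp at hk
  | cons a t ih =>
    cases k with
    | zero => simp_all [List.count_cons]
    | succ m =>
      simp only [List.length_cons] at hk
      have := ih m (by omega) (by simpa using hf)
      simp [List.count_cons, this]
      omega

theorem pvEnterCount (l : List Bool) (i : Int) (h : PySem.List.pyGetD l i true = false) :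
    (PySem.List.pySetD l i true).count false + 1 = l.count false := by
  simp only [PySem.List.pyGetD, PySem.List.pySetD, PySem.List.pyGet?, PySem.List.pySet?] at h ⊢
  cases hidx : PySem.List.pyIdx? l.length i with
  | none => simp [hidx] at h
  | some k =>
    simp only [hidx, Option.bind_some, Option.map_some, Option.getD_some] at h ⊢
    cases hk : l[k]? with
    | none => simp [hk] at h
    | some b =>
      simp only [hk, Option.getD_some] at h
      subst h
      obtain ⟨h1, h2⟩ := List.getElem?_eq_some_iff.mp hk
      exact pvCountSetTrue l k h1 h2

theorem pvNbsLen (graph : List (List Int)) (node : Int) :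
    (PySem.List.pyGetD graph node []).length ≤ (graph.map List.length).sum := by
  unfold PySem.List.pyGetD
  cases hg : PySem.List.pyGet? graph node with
  | none => simp
  | some l =>
    have hm : l ∈ graph := PySem.List.mem_of_pyGet?_eq_some graph hg
    simp only [Option.getD_some]
    exact List.le_sum_of_mem (List.mem_map_of_mem hm)

-- the while-stack loop of Source B
def runB (graph : List (List Int)) (disk : List Int) :
    List (Int × Int) → List Bool → List Int → Int → Int
  | [], _, _, cnt => cnt
  | (node, prev) :: rest, vis, amt, cnt =>
    if h : PySem.List.pyGetD vis node true = false ∧ PySem.List.pyGetD amt node 1 = 0 then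
      let vis1 := PySem.List.pySetD vis node true
      let cnt1 := if PySem.List.pyGetD disk node 0 ≠ prev then cnt + 1 else cnt
      let nbs := PySem.List.pyGetD graph node []
      let amt1 := nbs.foldl (fun a nb => PySem.List.pySetD a nb (PySem.List.pyGetD a nb 0 - 1)) amt
      runB graph disk (nbs.reverse.foldl (fun s nb => (nb, PySem.List.pyGetD disk node 0) :: s) rest)
        vis1 amt1 cnt1
    else runB graph disk rest vis amt cnt
termination_by stack vis amt cnt =>
  vis.count false * ((graph.map List.length).sum + 2) + stack.length
decreasing_by
  · -- enter step: visited count drops by one, at most sum-many neighbours are pushed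
    have hc := pvEnterCount vis node h.1
    have hn := pvNbsLen graph node
    rw [pvPush]
    simp only [List.length_append, List.length_map, List.length_cons]
    set S := (graph.map List.length).sum with hS
    set c1 := (PySem.List.pySetD vis node true).count false with hc1
    have : vis.count false = c1 + 1 := by omega
    rw [this, Nat.add_mul, Nat.one_mul]
    have : (PySem.List.pyGetD graph node []).length + rest.length < S + 2 + (rest.length + 1) := by
      omega
    omega
  · -- skip step: stack shrinks
    simp

def swaps_alt (disk : List Int) (depends : List (List Int)) : Int :=
  let n := disk.length
  let graph := buildGraphB depends (List.replicate n [])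
  let amounts := depends.map (fun d => (d.length : Int))
  match PySem.List.index? depends [] with
  | none => 0
  | some start =>
    runB graph disk [((start : Int), PySem.List.pyGetD disk (start : Int) 0)]
      (List.replicate n false) amounts 0

-- ===== PRECONDITION & SPEC =====
-- Pre_ excludes exactly the inputs on which A raises: a dependency entry that is not a
-- valid (possibly negative) Python index into the disc list (IndexError), a length
-- mismatch between disk and depends (IndexError), and the absence of a node with an
-- empty dependency list (find_start returns None and unpacking raises TypeError).
def Pre_swaps (disk : List Int) (depends : List (List Int)) : Prop :=
  disk.length = depends.length ∧ (∃ l ∈ depends, l = []) ∧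
    ∀ l ∈ depends, ∀ x ∈ l, -(disk.length : Int) ≤ x ∧ x < (disk.length : Int)
instance (disk : List Int) (depends : List (List Int)) : Decidable (Pre_swaps disk depends) := by
  unfold Pre_swaps; infer_instance

def pvWitness_swaps : List Int × List (List Int) := ([1, 2], [[], [0]])

def Spec_swaps (disk : List Int) (depends : List (List Int)) (out : Int) : Prop := out = swaps_alt disk depends
instance (disk : List Int) (depends : List (List Int)) (out : Int) : Decidable (Spec_swaps disk depends out) := by unfold Spec_swaps; infer_instance

-- ===== CLAIM (what is proved, stated in full; the proofs are below) =====
def Claim_equal_swaps : Prop := ∀ (disk : List Int) (depends : List (List Int)), Dom_swaps disk depends → Pre_swaps disk depends → Spec_swaps disk depends (swaps disk depends)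

-- ===== LEMMAS AND PROOFS =====

theorem pvSetTrueCountLeAux (l : List Bool) (k : Nat) :
    ((l.set k true).count false) ≤ l.count false := by
  induction l generalizing k with
  | nil => simp
  | cons a t ih =>
    cases k with
    | zero => cases a <;> simp [List.count_cons]
    | succ m => simp [List.count_cons]; have := ih m; omega

theorem pvSetTrueCountLe (l : List Bool) (i : Int) :
    ((PySem.List.pySetD l i true).count false) ≤ l.count false := by
  unfold PySem.List.pySetD PySem.List.pySet?
  cases hidx : PySem.List.pyIdx? l.length i with
  | none => simp
  | some k => simpa using pvSetTrueCountLeAux l k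


theorem runB_nil (g : List (List Int)) (d : List Int) (vis : List Bool) (amt : List Int) (cnt : Int) :
    runB g d [] vis amt cnt = cnt := by rw [runB]

theorem runB_cons (g : List (List Int)) (d : List Int) (node prev : Int) (rest : List (Int × Int))
    (vis : List Bool) (amt : List Int) (cnt : Int) :
    runB g d ((node, prev) :: rest) vis amt cnt =
    if PySem.List.pyGetD vis node true = false ∧ PySem.List.pyGetD amt node 1 = 0 then
      runB g d ((PySem.List.pyGetD g node []).reverse.foldl
          (fun s nb => (nb, PySem.List.pyGetD d node 0) :: s) rest)
        (PySem.List.pySetD vis node true)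
        ((PySem.List.pyGetD g node []).foldl (fun a nb => PySem.List.pySetD a nb (PySem.List.pyGetD a nb 0 - 1)) amt)
        (if PySem.List.pyGetD d node 0 ≠ prev then cnt + 1 else cnt)
    else runB g d rest vis amt cnt := by
  rw [runB]
  split <;> rfl

-- visited-count monotonicity of A's explore
theorem pvLoopMono (graph : List (List Int)) (disk : List Int) (f : Nat)
    (hE : ∀ (node prev : Int) vis par amt cnt,
      ((exploreA graph disk f node prev (vis, par, amt, cnt)).1).count false ≤ vis.count false) :
    ∀ (nbs : List Int) (node : Int) vis par amt cnt,
      ((exploreLoopA graph disk f node nbs (vis, par, amt, cnt)).1).count false ≤ vis.count false := by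
  intro nbs
  induction nbs with
  | nil => intro node vis par amt cnt; rw [exploreLoopA]
  | cons nb rest ih =>
    intro node vis par amt cnt
    rw [exploreLoopA]
    split
    · rcases hst : exploreA graph disk f nb (PySem.List.pyGetD disk node 0)
        (vis, PySem.List.pySetD par nb (some node), amt, cnt) with ⟨v2, p2, a2, c2⟩
      have h2 : v2.count false ≤ vis.count false := by
        have := hE nb (PySem.List.pyGetD disk node 0) vis (PySem.List.pySetD par nb (some node)) amt cnt
        rw [hst] at this; exact this
      exact le_trans (ih node v2 p2 a2 c2) h2
    · exact ih node vis par amt cnt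

theorem pvExplMono (graph : List (List Int)) (disk : List Int) :
    ∀ (f : Nat) (node prev : Int) vis par amt cnt,
      ((exploreA graph disk f node prev (vis, par, amt, cnt)).1).count false ≤ vis.count false := by
  intro f
  induction f with
  | zero => intro node prev vis par amt cnt; rw [exploreA]
  | succ f ih =>
    intro node prev vis par amt cnt
    rw [exploreA]
    split
    · exact le_trans
        (pvLoopMono graph disk f ih _ node _ par _ _)
        (pvSetTrueCountLe vis node)
    · exact le_refl _

-- the main simulation: one stack frame behaves like one call of A's explore,
-- a block of frames (the pushed neighbours) like A's neighbour loop
theorem pvMain (graph : List (List Int)) (disk : List Int) : ∀ (f : Nat),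
    (∀ (node prev : Int) vis par amt cnt (rest : List (Int × Int)),
      vis.count false < f →
      PySem.List.pyGetD vis node true = false →
      runB graph disk ((node, prev) :: rest) vis amt cnt =
        runB graph disk rest (exploreA graph disk f node prev (vis, par, amt, cnt)).1
          (exploreA graph disk f node prev (vis, par, amt, cnt)).2.2.1
          (exploreA graph disk f node prev (vis, par, amt, cnt)).2.2.2) ∧
    (∀ (nbs : List Int) (node : Int) vis par amt cnt (rest : List (Int × Int)),
      vis.count false < f →
      runB graph disk (nbs.map (fun nb => (nb, PySem.List.pyGetD disk node 0)) ++ rest) vis amt cnt =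
        runB graph disk rest (exploreLoopA graph disk f node nbs (vis, par, amt, cnt)).1
          (exploreLoopA graph disk f node nbs (vis, par, amt, cnt)).2.2.1
          (exploreLoopA graph disk f node nbs (vis, par, amt, cnt)).2.2.2) := by
  intro f
  induction f with
  | zero =>
    constructor
    · intro node prev vis par amt cnt rest hf; omega
    · intro nbs node vis par amt cnt rest hf; omega
  | succ f ih =>
    have hE : ∀ (node prev : Int) vis par amt cnt (rest : List (Int × Int)),
        vis.count false < f + 1 →
        PySem.List.pyGetD vis node true = false →
        runB graph disk ((node, prev) :: rest) vis amt cnt =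
          runB graph disk rest (exploreA graph disk (f+1) node prev (vis, par, amt, cnt)).1
            (exploreA graph disk (f+1) node prev (vis, par, amt, cnt)).2.2.1
            (exploreA graph disk (f+1) node prev (vis, par, amt, cnt)).2.2.2 := by
      intro node prev vis par amt cnt rest hf hvis
      rw [runB_cons, exploreA]
      by_cases hamt : PySem.List.pyGetD amt node 1 = 0
      · rw [if_pos ⟨hvis, hamt⟩, if_pos hamt]
        rw [pvPush]
        have hcnt : (PySem.List.pySetD vis node true).count false < f := by
          have := pvEnterCount vis node hvis; omega
        exact ih.2 (PySem.List.pyGetD graph node []) node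
          (PySem.List.pySetD vis node true) par _ _ rest hcnt
      · rw [if_neg (by simp [hamt]), if_neg hamt]
    refine ⟨hE, ?_⟩
    intro nbs
    induction nbs with
    | nil =>
      intro node vis par amt cnt rest hf
      rw [exploreLoopA]
      simp
    | cons nb rest2 ihl =>
      intro node vis par amt cnt rest hf
      rw [exploreLoopA]
      by_cases hv : PySem.List.pyGetD vis nb true = false
      · rw [if_pos hv]
        rcases hst : exploreA graph disk (f+1) nb (PySem.List.pyGetD disk node 0)
            (vis, PySem.List.pySetD par nb (some node), amt, cnt) with ⟨v2, p2, a2, c2⟩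
        have step := hE nb (PySem.List.pyGetD disk node 0) vis (PySem.List.pySetD par nb (some node))
          amt cnt (rest2.map (fun nb => (nb, PySem.List.pyGetD disk node 0)) ++ rest) hf hv
        rw [hst] at step
        simp only [List.map_cons, List.cons_append]
        rw [step]
        have hmono : v2.count false ≤ vis.count false := by
          have := pvExplMono graph disk (f+1) nb (PySem.List.pyGetD disk node 0)
            vis (PySem.List.pySetD par nb (some node)) amt cnt
          rw [hst] at this; exact this
        exact ihl node v2 p2 a2 c2 rest (by omega)
      · rw [if_neg hv]
        simp only [List.map_cons, List.cons_append]
        rw [runB_cons, if_neg (by simp [hv])]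
        exact ihl node vis par amt cnt rest hf

-- the two graph constructions agree
theorem pvGraphEq (depends : List (List Int)) (g : List (List Int)) (hlen : g.length = depends.length) :
    createGraphA g depends = buildGraphB depends g := by
  unfold createGraphA buildGraphB
  rw [hlen, PySem.List.enumerate_eq_map_pyRange depends [], List.foldl_map]
  simp only [PySem.List.len_eq]
  refine PySem.List.foldl_congr_mem _ _ _ _ ?_
  intro acc i _
  exact PySem.List.foldl_pyRange_zero_pyGetD' (PySem.List.pyGetD depends i []) 0
    (fun g'' x => pvAppendAt g'' x i) acc

theorem pvAmAux : ∀ (deps : List (List Int)) (a : List Int), deps.length ≤ a.length →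
    (PySem.List.pyRange 0 (deps.length : Int) 1).foldl
      (fun acc i => PySem.List.pySetD acc i ((PySem.List.pyGetD deps i []).length : Int)) a
     = deps.map (fun l => (l.length : Int)) ++ a.drop deps.length := by
  intro deps
  induction deps using List.reverseRecOn with
  | nil => intro a ha; simp [PySem.List.pyRange_one_eq_nil (le_refl 0)]
  | append_singleton ds d ih =>
    intro a ha
    simp only [List.length_append, List.length_singleton] at ha ⊢
    have hcast : (((ds.length + 1 : Nat)) : Int) = (ds.length : Int) + 1 := by push_cast; ring
    rw [hcast, PySem.List.pyRange_one_succ_right (by positivity), List.foldl_append]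
    have hcong : (PySem.List.pyRange 0 (ds.length : Int) 1).foldl
        (fun acc i => PySem.List.pySetD acc i ((PySem.List.pyGetD (ds ++ [d]) i []).length : Int)) a
      = (PySem.List.pyRange 0 (ds.length : Int) 1).foldl
        (fun acc i => PySem.List.pySetD acc i ((PySem.List.pyGetD ds i []).length : Int)) a := by
      refine PySem.List.foldl_congr_mem _ _ _ _ ?_
      intro acc i hi
      rw [PySem.List.mem_pyRange_one] at hi
      rw [PySem.List.pyGetD_of_nonneg _ _ hi.1, PySem.List.pyGetD_of_nonneg _ _ hi.1,
        List.getD_append ds [d] [] i.toNat (by omega)]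
    rw [hcong, ih a (by omega)]
    simp only [List.foldl_cons, List.foldl_nil]
    have h1 : PySem.List.pyGetD (ds ++ [d]) (ds.length : Int) [] = d := by
      rw [PySem.List.pyGetD_of_nonneg _ _ (by positivity)]
      simp [List.getD_eq_getElem?_getD]
    rw [h1, PySem.List.pySetD_natCast]
    have hdrop : a.drop ds.length = a[ds.length] :: a.drop (ds.length + 1) :=
      (List.getElem_cons_drop (by omega)).symm
    rw [hdrop, List.map_append]
    rw [List.set_append_right _ _ (by simp)]
    simp only [List.length_map, Nat.sub_self, List.set_cons_zero, List.map_cons, List.map_nil,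
      List.append_assoc, List.cons_append, List.nil_append]

-- add_amounts on a zero list of the right length is the length map
theorem pvAmountsEq (depends : List (List Int)) (n : Nat) (hn : n = depends.length) :
    addAmountsA (List.replicate n 0) depends = depends.map (fun d => (d.length : Int)) := by
  unfold addAmountsA
  subst hn
  have := pvAmAux depends (List.replicate depends.length 0) (by simp)
  simpa using this

theorem pvFsAux (disk : List Int) : ∀ (tail : List (List Int)) (a : Nat) (full : List (List Int)),
    full.drop a = tail →
    findStartGo disk full (PySem.List.pyRange (a : Int) (full.length : Int) 1) =
      (List.idxOf? [] tail).map (fun k => (((a + k : Nat) : Int), PySem.List.pyGetD disk ((a + k : Nat) : Int) 0)) := by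
  intro tail
  induction tail with
  | nil =>
    intro a full hd
    have : full.length ≤ a := by
      by_contra hlt
      push_neg at hlt
      have := List.drop_eq_nil_iff.mp hd
      omega
    rw [PySem.List.pyRange_one_eq_nil (by exact_mod_cast this)]
    simp [findStartGo]
  | cons t rest2 ih =>
    intro a full hd
    have ha : a < full.length := by
      by_contra hge
      push_neg at hge
      rw [List.drop_eq_nil_iff.mpr hge] at hd
      simp at hd
    have h2 : full[a] :: full.drop (a+1) = t :: rest2 := (List.getElem_cons_drop ha).trans hd
    have hfa : full[a] = t := by injection h2
    have hdrop1 : full.drop (a+1) = rest2 := by injection h2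
    rw [PySem.List.pyRange_one_cons (by exact_mod_cast ha)]
    rw [findStartGo]
    have hval : PySem.List.pyGetD full ((a : Nat) : Int) [] = t := by
      rw [PySem.List.pyGetD_of_nonneg _ _ (by positivity)]
      simp only [Int.toNat_natCast]
      rw [List.getD_eq_getElem?_getD, List.getElem?_eq_getElem ha, hfa]
      rfl
    simp only [hval]
    rw [List.idxOf?_cons]
    by_cases ht : t = ([] : List Int)
    · subst ht
      simp
    · rw [if_neg (by simpa using ht), if_neg (by simpa [List.length_eq_zero_iff] using ht)]
      have hrec := ih (a+1) full hdrop1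
      rw [show ((a : Int) + 1) = ((a + 1 : Nat) : Int) by push_cast; ring, hrec]
      cases List.idxOf? ([] : List Int) rest2 with
      | none => simp
      | some k =>
        simp only [Option.map_some]
        have h3 : a + 1 + k = a + (k + 1) := by omega
        simp [h3]

-- find_start is the first index with an empty dependency list
theorem pvFindStartEq (disk : List Int) (depends : List (List Int))
    (hlen : disk.length = depends.length) :
    findStartA disk depends =
      (List.idxOf? [] depends).map (fun k => ((k : Int), PySem.List.pyGetD disk (k : Int) 0)) := by
  unfold findStartA
  rw [hlen]
  have haux := pvFsAux disk depends 0 depends rfl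
  cases h : List.idxOf? ([] : List Int) depends with
  | none => rw [h] at haux; simpa using haux
  | some k => rw [h] at haux; simpa using haux

-- ===== VERDICT (by name: the statement is the Claim_ definition above) =====
theorem swaps_spec : Claim_equal_swaps := by
  intro disk depends _ hpre
  obtain ⟨hlen, hex, _⟩ := hpre
  unfold Spec_swaps swaps swaps_alt
  obtain ⟨l, hl, hleq⟩ := hex
  subst hleq
  obtain ⟨k, hk⟩ : ∃ k, List.idxOf? ([] : List Int) depends = some k :=
    Option.isSome_iff_exists.mp (List.isSome_idxOf?.mpr hl)
  simp only [pvFindStartEq disk depends hlen,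
    pvGraphEq depends (List.replicate disk.length []) (by simpa using hlen),
    pvAmountsEq depends disk.length hlen, PySem.List.index?, hk, Option.map_some]
  have hkd : k < depends.length := by
    obtain ⟨h1, -, -⟩ := List.idxOf?_eq_some_iff.mp hk
    exact h1
  have hvis : PySem.List.pyGetD (List.replicate disk.length false) ((k : Nat) : Int) true = false := by
    rw [PySem.List.pyGetD_of_nonneg _ _ (by positivity)]
    simp [List.getD_eq_getElem?_getD, show k < disk.length by omega]
  have hcnt : (List.replicate disk.length false).count false < disk.length + 1 := by simp
  have hmain := (pvMain (buildGraphB depends (List.replicate disk.length [])) disk (disk.length + 1)).1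
    ((k : Nat) : Int) (PySem.List.pyGetD disk ((k : Nat) : Int) 0)
    (List.replicate disk.length false) (List.replicate disk.length none)
    (depends.map (fun d => (d.length : Int))) 0 [] hcnt hvis
  rw [runB_nil] at hmain
  exact hmain.symm
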